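-- pv_equiv track=rewrite | github.com/huxiaosir/RL-Group | mah_tool/suphx_extract_features/tool.py | get_qidui_single_card
-- ===== SOURCE A (Python) =====
-- def get_qidui_single_card(handcards):  # 获取七对的孤张
--     single_cards = []
--     L = set(handcards)
--
--     for card in L:
--         if handcards.count(card) == 1:
--             single_cards.append(card)
--     single_cards.sort()
--     return single_cards
-- ===== SOURCE B (Python) =====
-- def get_qidui_single_card(handcards):
--     s = sorted(handcards)
--     single_cards = []
--     i = 0
--     n = len(s)
--     while i < n:
--         j = i
--         while j < n and s[j] == s[i]:
--             j += 1
--         if j - i == 1: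
--             single_cards.append(s[i])
--         i = j
--     return single_cards
-- ===== Notes on version B (the rewrite author's own statement) =====
-- stated objective: faster
-- what changed: Replaces the set + per-element handcards.count(card) scans + final sort with one sorted copy walked once, emitting the value of each maximal run of length exactly 1.
import Mathlib
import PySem

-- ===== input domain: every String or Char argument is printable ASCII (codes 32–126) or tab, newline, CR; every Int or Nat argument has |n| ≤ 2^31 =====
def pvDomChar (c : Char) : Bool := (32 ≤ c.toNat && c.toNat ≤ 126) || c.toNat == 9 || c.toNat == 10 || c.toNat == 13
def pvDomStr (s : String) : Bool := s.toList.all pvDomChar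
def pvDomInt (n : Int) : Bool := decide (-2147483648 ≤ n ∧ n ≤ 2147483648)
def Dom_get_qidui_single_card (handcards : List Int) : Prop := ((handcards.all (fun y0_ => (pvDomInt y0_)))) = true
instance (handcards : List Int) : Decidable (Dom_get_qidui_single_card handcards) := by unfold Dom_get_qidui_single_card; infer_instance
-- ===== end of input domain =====

-- B replaces A's set + per-element handcards.count scans + final sort with one sorted
-- copy walked run by run; neither program mutates the input list.
-- ===== PORT A =====
-- Python A appends while iterating set(handcards); since the appended values are
-- distinct and sorted afterwards, the result does not depend on the set's iteration
-- order, so Set.ofList's order is a faithful model.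
def get_qidui_single_card (handcards : List Int) : List Int :=
  let L : PySem.Set Int := PySem.Set.ofList handcards
  let single_cards :=
    L.foldl (fun acc card =>
      if PySem.List.count handcards card = 1 then acc ++ [card] else acc) []
  PySem.List.sorted single_cards (fun x => x) false

-- ===== PORT B =====
-- the outer while-loop of Source B: each step consumes one maximal run of equal values,
-- keeping the run's value exactly when the run has length 1
def pvRunScan : List Int → List Int
  | [] => []
  | x :: xs =>
    let run := xs.takeWhile (fun y => y == x)
    let rest := xs.dropWhile (fun y => y == x)
    if run.length = 0 then x :: pvRunScan rest else pvRunScan rest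
termination_by l => l.length
decreasing_by
  all_goals simp only [List.length_cons]
  all_goals exact Nat.lt_succ_of_le (List.length_dropWhile_le _ _)

def get_qidui_single_card_alt (handcards : List Int) : List Int :=
  pvRunScan (PySem.List.sorted handcards (fun x => x) false)

-- ===== PRECONDITION & SPEC =====
def Spec_get_qidui_single_card (handcards : List Int) (out : List Int) : Prop := out = get_qidui_single_card_alt handcards
instance (handcards : List Int) (out : List Int) : Decidable (Spec_get_qidui_single_card handcards out) := by unfold Spec_get_qidui_single_card; infer_instance

-- ===== CLAIM (what is proved, stated in full; the proofs are below) =====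
def Claim_equal_get_qidui_single_card : Prop := ∀ (handcards : List Int), Dom_get_qidui_single_card handcards → Spec_get_qidui_single_card handcards (get_qidui_single_card handcards)

-- ===== LEMMAS AND PROOFS =====

-- on a pairwise-≤ list whose elements are all ≥ x, everything surviving
-- dropWhile (· == x) is strictly greater than x
lemma pv_dropWhile_gt (x : Int) : ∀ (xs : List Int), xs.Pairwise (· ≤ ·) →
    (∀ y ∈ xs, x ≤ y) → ∀ y ∈ xs.dropWhile (fun y => y == x), x < y := by
  intro xs
  induction xs with
  | nil => simp
  | cons a as ih =>
    intro hpw hle y hy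
    rw [List.pairwise_cons] at hpw
    by_cases hax : a = x
    · rw [List.dropWhile_cons_of_pos (by simp [hax])] at hy
      exact ih hpw.2 (fun z hz => hle z (List.mem_cons_of_mem a hz)) y hy
    · rw [List.dropWhile_cons_of_neg (by simp [hax])] at hy
      have hxa : x < a := lt_of_le_of_ne (hle a List.mem_cons_self) (Ne.symm hax)
      rcases List.mem_cons.mp hy with h | h
      · exact h ▸ hxa
      · exact lt_of_lt_of_le hxa (hpw.1 y h)

-- one unfolding step of pvRunScan on a cons cell
lemma pvRunScan_cons (x : Int) (xs : List Int) :
    pvRunScan (x :: xs) =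
      if (xs.takeWhile (fun y => y == x)).length = 0
      then x :: pvRunScan (xs.dropWhile (fun y => y == x))
      else pvRunScan (xs.dropWhile (fun y => y == x)) := by
  rw [pvRunScan]

-- pvRunScan only returns elements of its argument (fuel = a length bound)
lemma pvRunScan_subset : ∀ (n : Nat) (l : List Int), l.length ≤ n →
    ∀ y ∈ pvRunScan l, y ∈ l := by
  intro n
  induction n with
  | zero =>
    intro l hl
    rw [List.length_eq_zero_iff.mp (Nat.le_zero.mp hl)]
    simp [pvRunScan]
  | succ n ih =>
    intro l hl y hy
    cases l with
    | nil => simp [pvRunScan] at hy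
    | cons x xs =>
      rw [pvRunScan_cons] at hy
      have hrl : (xs.dropWhile (fun y => y == x)).length ≤ n := by
        have := List.length_dropWhile_le (fun y => y == x) xs
        simp only [List.length_cons] at hl; omega
      split_ifs at hy with hlen
      · rcases List.mem_cons.mp hy with h | h
        · simp [h]
        · exact List.mem_cons_of_mem x
            ((List.dropWhile_sublist (p := fun y => y == x) (l := xs)).mem (ih _ hrl y h))
      · exact List.mem_cons_of_mem x
          ((List.dropWhile_sublist (p := fun y => y == x) (l := xs)).mem (ih _ hrl y hy))

-- main characterisation: on a pairwise-≤ list, pvRunScan returns exactly the values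
-- of count 1, in strictly increasing order
lemma pvRunScan_spec : ∀ (n : Nat) (l : List Int), l.length ≤ n → l.Pairwise (· ≤ ·) →
    (∀ y, y ∈ pvRunScan l ↔ l.count y = 1) ∧ (pvRunScan l).Pairwise (· < ·) := by
  intro n
  induction n with
  | zero =>
    intro l hl _
    rw [List.length_eq_zero_iff.mp (Nat.le_zero.mp hl)]
    simp [pvRunScan]
  | succ n ih =>
    intro l hl hpw
    cases l with
    | nil => simp [pvRunScan]
    | cons x xs =>
      rw [List.pairwise_cons] at hpw
      simp only [List.length_cons] at hl
      have hgt : ∀ y ∈ xs.dropWhile (fun y => y == x), x < y :=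
        pv_dropWhile_gt x xs hpw.2 hpw.1
      have hrest_x : (xs.dropWhile (fun y => y == x)).count x = 0 :=
        List.count_eq_zero_of_not_mem (fun h => lt_irrefl x (hgt x h))
      by_cases hlen : (xs.takeWhile (fun y => y == x)).length = 0
      · -- singleton run: the head of xs (if any) already differs from x
        have hrest : xs.dropWhile (fun y => y == x) = xs := by
          cases xs with
          | nil => rfl
          | cons a t =>
            have ha : ¬ ((a == x) = true) := by
              intro h
              simp [h] at hlen
            exact List.dropWhile_cons_of_neg ha
        rw [hrest] at hgt hrest_x
        obtain ⟨ihm, ihpw⟩ := ih xs (by omega) hpw.2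
        have hscan : pvRunScan (x :: xs) = x :: pvRunScan xs := by
          rw [pvRunScan_cons, if_pos hlen, hrest]
        constructor
        · intro y
          rw [hscan, List.mem_cons]
          by_cases hyx : y = x
          · subst hyx
            simp [List.count_cons_self, hrest_x]
          · rw [List.count_cons_of_ne (Ne.symm hyx)]
            constructor
            · rintro (h | h)
              · exact absurd h hyx
              · exact (ihm y).mp h
            · intro h; exact Or.inr ((ihm y).mpr h)
        · rw [hscan]
          exact List.pairwise_cons.mpr
            ⟨fun y hy => hgt y (pvRunScan_subset n xs (by omega) y hy), ihpw⟩
      · -- run of length ≥ 2: x is dropped entirely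
        have hrl : (xs.dropWhile (fun y => y == x)).length ≤ n := by
          have := List.length_dropWhile_le (fun y => y == x) xs
          omega
        obtain ⟨ihm, ihpw⟩ := ih _ hrl (hpw.2.sublist (List.dropWhile_sublist _))
        have hscan : pvRunScan (x :: xs) =
            pvRunScan (xs.dropWhile (fun y => y == x)) := by
          rw [pvRunScan_cons, if_neg hlen]
        have hdecomp : xs
            = xs.takeWhile (fun y => y == x) ++ xs.dropWhile (fun y => y == x) :=
          (List.takeWhile_append_dropWhile).symm
        have hrun_x : ∀ y ∈ xs.takeWhile (fun y => y == x), y = x :=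
          fun y hy => by have := List.mem_takeWhile_imp hy; simpa using this
        refine ⟨fun y => ?_, hscan ▸ ihpw⟩
        rw [hscan]
        by_cases hyx : y = x
        · subst hyx
          have hcnt : (y :: xs).count y
              = 1 + (xs.takeWhile (fun z => z == y)).length := by
            conv_lhs => rw [hdecomp]
            rw [List.count_cons_self, List.count_append, hrest_x,
              List.count_eq_length.mpr (fun z hz => ((hrun_x z hz).symm : y = z))]
            omega
          constructor
          · intro h
            have := (ihm y).mp h
            rw [hrest_x] at this
            omega
          · intro h; rw [hcnt] at h; omega
        · have hrun_y : (xs.takeWhile (fun z => z == x)).count y = 0 :=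
            List.count_eq_zero_of_not_mem (fun h => hyx (hrun_x y h))
          have hcnt : (x :: xs).count y = (xs.dropWhile (fun z => z == x)).count y := by
            conv_lhs => rw [hdecomp]
            rw [List.count_cons_of_ne (Ne.symm hyx), List.count_append, hrun_y]
            omega
          rw [hcnt]; exact ihm y

-- ===== VERDICT (by name: the statement is the Claim_ definition above) =====
theorem get_qidui_single_card_spec : Claim_equal_get_qidui_single_card := by
  intro handcards _
  unfold Spec_get_qidui_single_card get_qidui_single_card get_qidui_single_card_alt
  simp only [PySem.List.foldl_append_ite_eq_filter
    (p := fun card => PySem.List.count handcards card = 1), List.nil_append]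
  set s := PySem.List.sorted handcards (fun x => x) false with hs
  have hspw : s.Pairwise (· ≤ ·) := PySem.List.sorted_pairwise handcards (fun x => x)
  obtain ⟨hmem, hpwlt⟩ := pvRunScan_spec s.length s (le_refl _) hspw
  apply PySem.List.sorted_eq_of_perm_of_pairwise_lt
  · rw [List.perm_ext_iff_of_nodup
      (hpwlt.imp fun h => ne_of_lt h)
      ((PySem.Set.nodup_ofList handcards).filter _)]
    intro y
    rw [hmem y, List.mem_filter, PySem.Set.mem_ofList]
    have hc : s.count y = handcards.count y :=
      (PySem.List.sorted_perm handcards (fun x => x) false).count_eq y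
    simp only [PySem.List.count_eq, decide_eq_true_eq, hc]
    constructor
    · intro h; exact ⟨List.count_pos_iff.mp (by omega), h⟩
    · exact fun h => h.2
  · exact hpwlt
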